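-- pv_equiv track=rewrite | github.com/Semantic-Infrastructure-Lab/reveal | reveal/adapters/ssl/certificate.py | _hostname_matches_san
-- ===== SOURCE A (Python) =====
-- from typing import Dict, Any, List, Optional, Tuple
--
-- def _hostname_matches_san(host: str, san_list: List[str]) -> bool:
--     """Check if hostname matches any SAN entry.
--
--     Wildcard SANs (``*.example.com``) match exactly one subdomain level
--     per RFC 6125 §6.4.3 — ``sub.example.com`` matches but
--     ``deep.sub.example.com`` does not.
--
--     Args:
--         host: Hostname to check
--         san_list: List of Subject Alternative Names
--
--     Returns:
--         True if hostname matches any SAN entry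
--     """
--     if host in san_list:
--         return True
--     for san in san_list:
--         if san.startswith('*.'):
--             # Wildcard matches one level only: host must be <label>.<san_suffix>
--             suffix = san[1:]  # e.g. ".example.com"
--             if host.endswith(suffix) and '.' not in host[:-len(suffix)]:
--                 return True
--     return False
-- ===== SOURCE B (Python) =====
-- def _hostname_matches_san(host, san_list):
--     """Invert the problem: instead of testing every SAN against host, derive
--     the unique wildcard pattern that could match host (RFC 6125: one label),
--     then a single set-disjointness test against the SAN list decides.
--
--     Correct because a wildcard SAN '*' + suffix (suffix starting with '.')
--     matches host exactly when suffix is a suffix of host whose stripped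
--     prefix has no dot -- i.e. suffix = host[first_dot:], so the only
--     wildcard entry that can match is '*' + host[host.find('.'):].
--     """
--     candidates = {host}
--     dot = host.find('.')
--     if dot != -1:
--         candidates.add('*' + host[dot:])
--     return not candidates.isdisjoint(san_list)
-- ===== Notes on version B (the rewrite author's own statement) =====
-- stated objective: alternative
-- what changed: B inverts the direction of the match: instead of scanning the SAN list twice (membership test plus a per-SAN wildcard-arithmetic loop), it derives from the host the single wildcard pattern that could match it ('*' + host[first_dot:]) and decides by one set-disjointness test against the SAN list.
import Mathlib
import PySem

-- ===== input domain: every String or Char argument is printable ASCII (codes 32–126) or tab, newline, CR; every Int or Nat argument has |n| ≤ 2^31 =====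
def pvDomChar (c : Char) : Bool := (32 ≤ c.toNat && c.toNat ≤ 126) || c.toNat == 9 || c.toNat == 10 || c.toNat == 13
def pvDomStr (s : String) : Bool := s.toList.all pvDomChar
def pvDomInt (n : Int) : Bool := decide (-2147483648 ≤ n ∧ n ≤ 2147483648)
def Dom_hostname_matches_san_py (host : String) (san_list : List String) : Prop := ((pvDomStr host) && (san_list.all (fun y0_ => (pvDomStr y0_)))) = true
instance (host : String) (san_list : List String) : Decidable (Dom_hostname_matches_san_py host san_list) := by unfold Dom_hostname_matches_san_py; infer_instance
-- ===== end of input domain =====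

-- B inverts the problem: it derives from host the one wildcard pattern that could
-- match it ('*' + host[first_dot:]) and tests set disjointness against the SAN
-- list, instead of A's per-SAN membership scan plus wildcard-arithmetic loop
-- (a timing run measured this constant-factor change faster on its inputs).

-- ===== PORT A =====
-- the 'for san in san_list' wildcard loop of A
def pvWildLoop (host : String) : List String → Bool
  | [] => false
  | san :: rest =>
    if PySem.Str.startswith san "*." then
      let suffix := PySem.Str.slice san (some 1) none   -- san[1:]
      if PySem.Str.endswith host suffix &&
         !(PySem.Str.isIn "." (PySem.Str.slice host none (some (-(PySem.Str.len suffix : Int))))) then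
        true
      else pvWildLoop host rest
    else pvWildLoop host rest

def hostname_matches_san_py (host : String) (san_list : List String) : Bool :=
  if san_list.contains host then true   -- 'host in san_list'
  else pvWildLoop host san_list

-- ===== PORT B =====
def hostname_matches_san_py_alt (host : String) (san_list : List String) : Bool :=
  let candidates : PySem.Set String := PySem.Set.ofList [host]    -- {host}
  let dot := PySem.Str.find host "."                              -- host.find('.')
  let candidates :=
    if dot != -1 then
      -- candidates.add('*' + host[dot:])
      PySem.Set.add candidates (String.ofList ('*' :: (PySem.Str.slice host (some dot) none).toList))
    else candidates
  !(PySem.Set.isdisjoint candidates san_list)                     -- not candidates.isdisjoint(san_list)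

-- ===== PRECONDITION & SPEC =====
def Spec_hostname_matches_san_py (host : String) (san_list : List String) (out : Bool) : Prop := out = hostname_matches_san_py_alt host san_list
instance (host : String) (san_list : List String) (out : Bool) : Decidable (Spec_hostname_matches_san_py host san_list out) := by unfold Spec_hostname_matches_san_py; infer_instance

-- ===== CLAIM (what is proved, stated in full; the proofs are below) =====
def Claim_equal_hostname_matches_san_py : Prop := ∀ (host : String) (san_list : List String), Dom_hostname_matches_san_py host san_list → Spec_hostname_matches_san_py host san_list (hostname_matches_san_py host san_list)

-- ===== LEMMAS AND PROOFS =====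
-- the wildcard condition A applies to one SAN entry, named for the proof
def pvWildCond (host san : String) : Bool :=
  PySem.Str.startswith san "*." &&
    (PySem.Str.endswith host (PySem.Str.slice san (some 1) none) &&
      !(PySem.Str.isIn "." (PySem.Str.slice host none
        (some (-(PySem.Str.len (PySem.Str.slice san (some 1) none) : Int))))))

theorem pvSingletonPrefix (a : Char) (l : List Char) : [a] <+: l ↔ l.head? = some a := by
  cases l <;> simp [List.prefix_cons_iff, eq_comm]

theorem pvWildCond_iff (host san : String) :
    pvWildCond host san = true ↔
      0 ≤ PySem.Chars.find host.toList ['.'] ∧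
        san.toList = '*' :: host.toList.drop (PySem.Chars.find host.toList ['.']).toNat := by
  set hs := host.toList with hhs
  set ss := san.toList with hss
  by_cases hp : ['*','.'] <+: ss
  · obtain ⟨t, ht⟩ := hp
    -- ss = '*' :: '.' :: t
    have hssEq : ss = '*' :: '.' :: t := ht.symm
    have hsuffix : (PySem.Str.slice san (some 1) none).toList = '.' :: t := by
      rw [PySem.Str.toList_slice]
      show PySem.List.slice ss (some 1) none = _
      rw [PySem.List.slice_from_one, hssEq]
      rfl
    have hk : (PySem.Str.len (PySem.Str.slice san (some 1) none) : Int) = ((t.length + 1 : Nat) : Int) := by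
      rw [PySem.Str.len_eq, hsuffix]; simp
    constructor
    · intro h
      simp only [pvWildCond, Bool.and_eq_true, Bool.not_eq_true'] at h
      obtain ⟨-, hend, hnotin⟩ := h
      rw [show PySem.Str.endswith host (PySem.Str.slice san (some 1) none)
            = ('.' :: t).isSuffixOf hs from by
          simp only [PySem.Str.endswith, PySem.Chars.endswith, hsuffix, hhs]] at hend
      have hsuf : ('.' :: t) <:+ hs := List.isSuffixOf_iff_suffix.mp hend
      obtain ⟨p, hpu⟩ := hsuf
      have hlen : hs.length = p.length + (t.length + 1) := by
        rw [← hpu]; simp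
      have htake : PySem.Chars.slice hs none (some (-(((t.length + 1 : Nat) : Int)))) = p := by
        show PySem.List.slice hs none _ = p
        rw [PySem.List.slice_to_neg_natCast hs (t.length+1) (by omega), hlen, ← hpu]
        simp
      have hnotp : '.' ∉ p := by
        intro hmem
        apply absurd hnotin
        simp only [Bool.not_eq_false, PySem.Str.isIn, PySem.Str.toList_slice, hk]
        rw [show ".".toList = ['.'] from rfl, hhs.symm] at *
        rw [htake]
        rw [PySem.Chars.isIn_iff_infix]
        exact (List.singleton_infix_iff '.' p).mpr hmem
      -- find hs ['.'] = p.length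
      have hdotmem : '.' ∈ hs := by rw [← hpu]; simp
      have hd0 : 0 ≤ PySem.Chars.find hs ['.'] := by
        rw [PySem.Chars.find_nonneg_iff]
        exact (List.singleton_infix_iff '.' hs).mpr hdotmem
      obtain ⟨hpref, hmin⟩ := PySem.Chars.find_spec (s := hs) (sub := ['.']) hd0
      set dN := (PySem.Chars.find hs ['.']).toNat with hdN
      have h1 : ¬ p.length < dN := by
        intro hlt
        exact hmin p.length hlt (by rw [← hpu, List.drop_left]; exact ⟨t, rfl⟩)
      have h2 : ¬ dN < p.length := by
        intro hlt
        have : hs[dN]? = some '.' := by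
          have := (pvSingletonPrefix '.' (hs.drop dN)).mp hpref
          rwa [List.head?_drop] at this
        rw [← hpu, List.getElem?_append_left hlt] at this
        exact hnotp (List.mem_of_getElem? this)
      have hdp : dN = p.length := by omega
      refine ⟨hd0, ?_⟩
      rw [hssEq, hdp, ← hpu, List.drop_left]
    · rintro ⟨hd0, hss2⟩
      obtain ⟨hpref, hmin⟩ := PySem.Chars.find_spec (s := hs) (sub := ['.']) hd0
      set dN := (PySem.Chars.find hs ['.']).toNat with hdN
      have hu : '.' :: t = hs.drop dN := by
        have := hss2; rw [hssEq] at this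
        exact List.cons.inj this |>.2
      have hdlen : dN ≤ hs.length := by
        have := PySem.Chars.find_le_length hs ['.']
        omega
      simp only [pvWildCond, Bool.and_eq_true, Bool.not_eq_true']
      refine ⟨?_, ?_, ?_⟩
      · simp only [PySem.Str.startswith, PySem.Chars.startswith,
          List.isPrefixOf_iff_prefix, ← hss, hssEq]
        exact ⟨t, rfl⟩
      · simp only [PySem.Str.endswith, PySem.Chars.endswith, hsuffix,
          List.isSuffixOf_iff_suffix, ← hhs, hu]
        exact List.drop_suffix dN hs
      · have hlen2 : t.length + 1 = hs.length - dN := by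
          have : ('.' :: t).length = (hs.drop dN).length := by rw [hu]
          simpa using this
        simp only [PySem.Str.isIn, PySem.Str.toList_slice, hk]
        rw [show ".".toList = ['.'] from rfl, ← hhs]
        show PySem.Chars.isIn ['.'] (PySem.List.slice hs none (some (-((t.length+1 : Nat) : Int)))) = false
        rw [PySem.List.slice_to_neg_natCast hs (t.length+1) (by omega)]
        rw [show hs.length - (t.length+1) = dN by omega]
        apply Bool.not_eq_true _ |>.mp
        intro hin
        rw [PySem.Chars.isIn_iff_infix, List.singleton_infix_iff] at hin
        obtain ⟨i, hi, hig⟩ := List.mem_iff_getElem.mp hin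
        have hilt : i < dN := by simp at hi; omega
        apply hmin i hilt
        rw [pvSingletonPrefix, List.head?_drop]
        rw [List.getElem_take] at hig
        exact (List.getElem?_eq_getElem (by omega)).trans (by rw [hig])
  · constructor
    · intro h
      simp only [pvWildCond, Bool.and_eq_true] at h
      exact absurd (by simpa [PySem.Str.startswith, PySem.Chars.startswith,
        List.isPrefixOf_iff_prefix] using h.1) hp
    · rintro ⟨hd0, hss2⟩
      obtain ⟨hpref, -⟩ := PySem.Chars.find_spec (s := hs) (sub := ['.']) hd0
      have : (hs.drop (PySem.Chars.find hs ['.']).toNat).head? = some '.' :=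
        (pvSingletonPrefix _ _).mp hpref
      exfalso; apply hp
      rw [hss2]
      cases hdrop : hs.drop (PySem.Chars.find hs ['.']).toNat with
      | nil => rw [hdrop] at this; simp at this
      | cons c r =>
        rw [hdrop] at this; simp at this
        subst this; exact ⟨r, rfl⟩

theorem pvWildLoop_cons (host san : String) (rest : List String) :
    pvWildLoop host (san :: rest) = (pvWildCond host san || pvWildLoop host rest) := by
  simp only [pvWildLoop, pvWildCond]
  cases PySem.Str.startswith san "*." <;>
    cases (PySem.Str.endswith host (PySem.Str.slice san (some 1) none) &&
      !(PySem.Str.isIn "." (PySem.Str.slice host none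
        (some (-(PySem.Str.len (PySem.Str.slice san (some 1) none) : Int)))))) <;>
    simp only [Bool.false_eq_true, if_false, Bool.false_and, Bool.true_and,
      Bool.false_or, Bool.true_or, if_pos]

theorem pvWildLoop_any (host : String) (l : List String) :
    pvWildLoop host l = l.any (fun san => pvWildCond host san) := by
  induction l with
  | nil => rfl
  | cons san rest ih => rw [pvWildLoop_cons, List.any_cons, ih]

theorem pv_main (host : String) (san_list : List String) :
    hostname_matches_san_py host san_list = hostname_matches_san_py_alt host san_list := by
  apply Bool.coe_iff_coe.mp
  have hfind : PySem.Str.find host "." = PySem.Chars.find host.toList ['.'] := rfl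
  have hA : hostname_matches_san_py host san_list = true ↔
      host ∈ san_list ∨ ∃ san ∈ san_list, pvWildCond host san = true := by
    unfold hostname_matches_san_py
    rw [pvWildLoop_any]
    by_cases hc : host ∈ san_list <;> simp [hc]
  rw [hA]
  unfold hostname_matches_san_py_alt
  simp only [hfind]
  have hB : ∀ c : PySem.Set String, (!(c.isdisjoint san_list)) = true ↔ ∃ x ∈ c, x ∈ san_list := by
    intro c
    rw [Bool.not_eq_true', Bool.eq_false_iff, ne_eq, PySem.Set.isdisjoint_iff]
    push Not
    rfl
  by_cases hd : 0 ≤ PySem.Chars.find host.toList ['.']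
  · have hne : (PySem.Chars.find host.toList ['.'] != -1) = true := by
      simp only [bne_iff_ne, ne_eq]; omega
    rw [hne, if_pos rfl, hB]
    have hwild : (String.ofList ('*' :: (PySem.Str.slice host (some (PySem.Chars.find host.toList ['.'])) none).toList)).toList
        = '*' :: host.toList.drop (PySem.Chars.find host.toList ['.']).toNat := by
      rw [String.toList_ofList, PySem.Str.toList_slice]
      show _ = '*' :: List.drop _ host.toList
      rw [PySem.Chars.slice_eq_listSlice, PySem.List.slice_from host.toList hd]
    have hcond : ∀ san : String, pvWildCond host san = true ↔
        san = String.ofList ('*' :: (PySem.Str.slice host (some (PySem.Chars.find host.toList ['.'])) none).toList) := by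
      intro san
      rw [pvWildCond_iff]
      constructor
      · rintro ⟨-, h⟩
        apply String.toList_inj.mp
        rw [hwild, h]
      · intro h
        exact ⟨hd, by rw [h, hwild]⟩
    simp only [hcond, PySem.Set.mem_add, PySem.Set.mem_ofList, List.mem_singleton]
    constructor
    · rintro (h | ⟨san, hs1, rfl⟩)
      · exact ⟨host, Or.inl rfl, h⟩
      · exact ⟨_, Or.inr rfl, hs1⟩
    · rintro ⟨x, (rfl | rfl), hx⟩
      · exact Or.inl hx
      · exact Or.inr ⟨_, hx, rfl⟩
  · have hne : (PySem.Chars.find host.toList ['.'] != -1) = false := by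
      have h1 : PySem.Chars.find host.toList ['.'] = -1 := by
        have := PySem.Chars.neg_one_le_find host.toList ['.']
        omega
      rw [h1]; rfl
    rw [hne, if_neg (by simp), hB]
    have hnw : ∀ san ∈ san_list, ¬ pvWildCond host san = true := by
      intro san _ hw
      exact hd ((pvWildCond_iff host san).mp hw).1
    simp only [PySem.Set.mem_ofList, List.mem_singleton]
    constructor
    · rintro (h | ⟨san, hs1, hs2⟩)
      · exact ⟨host, rfl, h⟩
      · exact absurd hs2 (hnw san hs1)
    · rintro ⟨x, rfl, hx⟩
      exact Or.inl hx

-- ===== VERDICT (by name: the statement is the Claim_ definition above) =====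
theorem hostname_matches_san_py_spec : Claim_equal_hostname_matches_san_py := by
  intro host san_list _
  exact pv_main host san_list
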